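-- pv_equiv track=rewrite | github.com/A-Hareed/cis-proline-pred | scripts/arff_concat.py | concat_file
-- ===== SOURCE A (Python) =====
-- def concat_file(lst):
--     file = ''
--     counter = 0
--     if counter == 0:
--         for line in lst[0]:
--             file += line
--         counter = 1
--     if counter == 1:
--         for cat in lst[1:]:
--             match = 0
--             for line in cat:
--                 if match ==1:
--                     file += line
--
--                 if line == '@data\n':
--                     match = 1
--     return (file)
-- ===== SOURCE B (Python) =====
-- def concat_file(lst):
--     parts = [''.join(lst[0])]
--     for cat in lst[1:]:
--         if '@data\n' in cat:
--             parts.append(''.join(cat[cat.index('@data\n') + 1:]))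
--     return ''.join(parts)
-- ===== Notes on version B (the rewrite author's own statement) =====
-- stated objective: idiomatic
-- what changed: Replaces the per-line match flag and character-by-character string growth with index-and-slice: find the first '@data\n' with list.index, join the slice after it, and join accumulated parts once at the end.
import Mathlib
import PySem

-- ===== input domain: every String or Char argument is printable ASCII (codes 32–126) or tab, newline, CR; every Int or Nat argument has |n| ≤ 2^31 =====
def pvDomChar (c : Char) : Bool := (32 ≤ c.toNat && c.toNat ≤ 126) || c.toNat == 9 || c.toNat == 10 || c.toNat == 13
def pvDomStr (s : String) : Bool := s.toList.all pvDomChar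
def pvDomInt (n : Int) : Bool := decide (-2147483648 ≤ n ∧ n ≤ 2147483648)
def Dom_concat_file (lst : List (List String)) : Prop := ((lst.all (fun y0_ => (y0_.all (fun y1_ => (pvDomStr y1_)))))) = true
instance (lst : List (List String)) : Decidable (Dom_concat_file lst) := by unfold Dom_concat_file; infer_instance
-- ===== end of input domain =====

-- B idiomatic rewrite: per-file '@data\n' located by list.index and the tail sliced and joined,
-- instead of A's per-line match flag and string accumulation.  A raises IndexError on [] (excluded by Pre_).

-- ===== PORT A =====
-- inner loop of A over one file's lines: state (file, match)
def concatFileStep (st : String × Int) (line : String) : String × Int :=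
  let file := if st.2 == 1 then st.1 ++ line else st.1
  let m := if line == "@data\n" then (1 : Int) else st.2
  (file, m)

def concat_file (lst : List (List String)) : String :=
  match lst with
  | [] => ""   -- Python: lst[0] raises IndexError; excluded by Pre_
  | first :: _ =>
    let file := first.foldl (fun f line => f ++ line) ""
    (PySem.List.slice lst (some 1) none).foldl
      (fun file cat => (cat.foldl concatFileStep (file, 0)).1) file

-- ===== PORT B =====
def concat_file_alt (lst : List (List String)) : String :=
  match lst with
  | [] => ""   -- Python: lst[0] raises IndexError; excluded by Pre_
  | first :: _ =>
    let parts : List String := [String.join first]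
    let parts := (PySem.List.slice lst (some 1) none).foldl
      (fun ps cat =>
        if cat.contains "@data\n" then
          match PySem.List.index? cat "@data\n" with
          | some i => ps ++ [String.join (PySem.List.slice cat (some ((i : Int) + 1)) none)]
          | none => ps   -- unreachable: contains holds
        else ps) parts
    String.join parts

-- ===== PRECONDITION & SPEC =====
-- Pre_ excludes exactly the empty list, on which Python A raises IndexError (lst[0]).
def Pre_concat_file (lst : List (List String)) : Prop := lst ≠ []
instance (lst : List (List String)) : Decidable (Pre_concat_file lst) := by unfold Pre_concat_file; infer_instance
def pvWitness_concat_file : List (List String) := [["@relation r\n", "@data\n", "1,2\n"], ["h\n", "@data\n", "3,4\n"]]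
def Spec_concat_file (lst : List (List String)) (out : String) : Prop := out = concat_file_alt lst
instance (lst : List (List String)) (out : String) : Decidable (Spec_concat_file lst out) := by unfold Spec_concat_file; infer_instance

-- ===== CLAIM (what is proved, stated in full; the proofs are below) =====
def Claim_equal_concat_file : Prop := ∀ (lst : List (List String)), Dom_concat_file lst → Pre_concat_file lst → Spec_concat_file lst (concat_file lst)

-- ===== LEMMAS AND PROOFS =====

-- what one later file contributes: everything after its first '@data\n', or nothing
def tailAfterData (cat : List String) : String :=
  match PySem.List.index? cat "@data\n" with
  | some i => String.join (cat.drop (i + 1))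
  | none => ""

theorem foldl_strapp (xs : List String) (a : String) :
    xs.foldl (fun r s => r ++ s) a = a ++ xs.foldl (fun r s => r ++ s) "" := by
  induction xs generalizing a with
  | nil => simp
  | cons x xs ih =>
      simp only [List.foldl_cons]
      rw [ih (a ++ x), ih ("" ++ x)]
      simp [String.append_assoc]

theorem join_cons (x : String) (xs : List String) :
    String.join (x :: xs) = x ++ String.join xs := by
  simp only [String.join, List.foldl_cons]
  rw [foldl_strapp xs ("" ++ x)]
  simp

theorem join_append_singleton (l : List String) (s : String) :
    String.join (l ++ [s]) = String.join l ++ s := by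
  simp [String.join, List.foldl_append]

-- once match = 1 it stays 1 and every line is appended
theorem foldl_step_one (cat : List String) (f : String) :
    cat.foldl concatFileStep (f, 1) = (f ++ String.join cat, 1) := by
  induction cat generalizing f with
  | nil => simp [String.join]
  | cons x xs ih =>
      simp only [List.foldl_cons, concatFileStep]
      simp only [show ((1 : Int) == 1) = true from rfl, if_true, ite_self]
      rw [ih, join_cons, String.append_assoc]

theorem tailAfterData_cons_ne (x : String) (xs : List String) (hx : x ≠ "@data\n") :
    tailAfterData (x :: xs) = tailAfterData xs := by
  unfold tailAfterData
  rw [PySem.List.index?_cons_of_ne xs hx]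
  cases h : PySem.List.index? xs "@data\n" with
  | none => rfl
  | some i =>
      show String.join (List.drop (i + 1 + 1) (x :: xs)) = String.join (List.drop (i + 1) xs)
      rw [List.drop_succ_cons]

-- from match = 0: the inner loop appends exactly tailAfterData
theorem foldl_step_zero (cat : List String) (f : String) :
    (cat.foldl concatFileStep (f, 0)).1 = f ++ tailAfterData cat := by
  induction cat generalizing f with
  | nil =>
      simp only [List.foldl_nil, tailAfterData, PySem.List.index?]
      simp
  | cons x xs ih =>
      by_cases hx : x = "@data\n"
      · subst hx
        simp only [List.foldl_cons, concatFileStep]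
        simp only [show ((0 : Int) == 1) = false from rfl,
          show (("@data\n" : String) == "@data\n") = true from rfl,
          if_true, Bool.false_eq_true, if_false]
        rw [foldl_step_one]
        unfold tailAfterData
        rw [PySem.List.index?_cons_self]
        simp
      · have hne : (x == "@data\n") = false := by simp [hx]
        simp only [List.foldl_cons, concatFileStep, hne,
          show ((0 : Int) == 1) = false from rfl, Bool.false_eq_true, if_false]
        rw [ih, tailAfterData_cons_ne x xs hx]

-- B's per-file contribution equals tailAfterData
theorem bstep_join (ps : List String) (cat : List String) :
    String.join ((if cat.contains "@data\n" then
          match PySem.List.index? cat "@data\n" with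
          | some i => ps ++ [String.join (PySem.List.slice cat (some ((i : Int) + 1)) none)]
          | none => ps
        else ps)) = String.join ps ++ tailAfterData cat := by
  by_cases hc : cat.contains "@data\n"
  · have hm : "@data\n" ∈ cat := by simpa using hc
    cases h : PySem.List.index? cat "@data\n" with
    | none => exact absurd ((PySem.List.index?_eq_none_iff cat _).mp h) (by simpa using hm)
    | some i =>
        rw [if_pos hc]
        show String.join (ps ++ [String.join (PySem.List.slice cat (some ((i : Int) + 1)) none)])
          = String.join ps ++ tailAfterData cat
        rw [join_append_singleton]
        unfold tailAfterData
        rw [h]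
        show String.join ps ++ String.join (PySem.List.slice cat (some ((i : Int) + 1)) none)
          = String.join ps ++ String.join (List.drop (i + 1) cat)
        rw [show ((i : Int) + 1) = ((i + 1 : Nat) : Int) by push_cast; ring,
          PySem.List.slice_from_natCast]
  · have hnm : "@data\n" ∉ cat := by simpa using hc
    have h : PySem.List.index? cat "@data\n" = none := (PySem.List.index?_eq_none_iff cat _).mpr hnm
    rw [if_neg hc]
    unfold tailAfterData
    rw [h]
    show String.join ps = String.join ps ++ ""
    simp

theorem outer_fold (rest : List (List String)) (ps : List String) :
    rest.foldl (fun file cat => (cat.foldl concatFileStep (file, 0)).1) (String.join ps)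
      = String.join (rest.foldl (fun ps cat =>
          if cat.contains "@data\n" then
            match PySem.List.index? cat "@data\n" with
            | some i => ps ++ [String.join (PySem.List.slice cat (some ((i : Int) + 1)) none)]
            | none => ps
          else ps) ps) := by
  induction rest generalizing ps with
  | nil => rfl
  | cons c cs ih =>
      simp only [List.foldl_cons]
      rw [foldl_step_zero, ← bstep_join ps c]
      exact ih _

theorem first_fold (first : List String) :
    first.foldl (fun f line => f ++ line) "" = String.join first := rfl

-- ===== VERDICT (by name: the statement is the Claim_ definition above) =====
theorem concat_file_spec : Claim_equal_concat_file := by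
  intro lst _ hpre
  unfold Spec_concat_file concat_file concat_file_alt
  match lst with
  | [] => exact absurd rfl hpre
  | first :: rest =>
      simp only [first_fold]
      have h := outer_fold (PySem.List.slice (first :: rest) (some 1) none) [String.join first]
      have hj : String.join [String.join first] = String.join first := by simp [String.join]
      rw [hj] at h
      exact h
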